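/- GENERATED by tools/mkclosed.py from the statements of the heap toy (Toyh/Spec/Units/*.lean) — do not edit; re-run it when a statement changes.
   THE BOTTOM-UP COMPOSITION: every unit's contract with no hypothesis about a callee left, from the unit theorems, in a
   topological order of the hypotheses (4 units, 5 functions). -/
import ProgX.Base.Closed
import Toyh.Spec.Units.clamp_length
import Toyh.Spec.Units.prog_main
import Toyh.Spec.Units.sub_I_65535_1
import Toyh.Spec.Units.run_ctors
namespace Toyh.Closed
open X86 X86.User Asan

/-- **The bytes of every function are in the reference state**: the `_hcode` hypothesis of its units. -/
structure AllCode (Lay : Layout) (u₀ : State) : Prop where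
  /-- the bytes of `clamp_length` -/
  clamp_length : HasCodeNat Lay u₀ Toyh.L.clamp_length.entry Toyh.Code.code_clamp_length.nat Toyh.L.clamp_length.size
  /-- the bytes of `prog_main` -/
  prog_main : HasCodeNat Lay u₀ Toyh.L.prog_main.entry Toyh.Code.code_prog_main.nat Toyh.L.prog_main.size
  /-- the bytes of `_sub_I_65535_1` -/
  sub_I_65535_1 : HasCodeNat Lay u₀ Toyh.L._sub_I_65535_1.entry Toyh.Code.code__sub_I_65535_1.nat Toyh.L._sub_I_65535_1.size
  /-- the bytes of `run_ctors` -/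
  run_ctors : HasCodeNat Lay u₀ ProgX.Base.L.run_ctors.entry ProgX.Base.Code.code_run_ctors.nat ProgX.Base.L.run_ctors.size
  /-- the bytes of `__asan_register_globals` -/
  asan_register_globals : HasCodeNat Lay u₀ ProgX.Base.L.__asan_register_globals.entry ProgX.Base.Code.code___asan_register_globals.nat ProgX.Base.L.__asan_register_globals.size

/-- **The contract of every unit, with no hypothesis about a callee left.** -/
structure Contracts (Lay : Layout) (μ : Microarch) (u₀ : State) : Prop where
  /-- unit `clamp_length` -/
  clamp_length : ∀ (others : List Obj) (frames : List (Nat × FrameLayout)), Calls Lay μ ProgX.Base.WayInv (ProgX.Base.conv u₀) Toyh.L.clamp_length.entry (Toyh.Spec.clamp_length.spec others frames)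
  /-- unit `prog_main` -/
  prog_main : ∀ (H : Heap) (rest : List Obj) (frames : List (Nat × FrameLayout)), Calls Lay μ ProgX.Base.WayInv (ProgX.Base.conv u₀) Toyh.L.prog_main.entry (Toyh.Spec.prog_main.spec H rest frames)
  /-- unit `sub_I_65535_1` -/
  sub_I_65535_1 : Calls Lay μ ProgX.Base.WayInv (ProgX.Base.conv u₀) Toyh.L._sub_I_65535_1.entry (Asan.ctorSpec Toyh.Spec.rt)
  /-- unit `run_ctors` -/
  run_ctors : Calls Lay μ ProgX.Base.WayInv (ProgX.Base.conv u₀) ProgX.Base.L.run_ctors.entry (Asan.runCtorsSpec Toyh.Spec.rt)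

end Toyh.Closed
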